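-- pv_equiv track=rewrite | github.com/pililongo/Homebanking_ITBA | Backend/pruba_leer_csv.py | diccFilter
-- ===== SOURCE A (Python) =====
-- def diccFilter(dicName, keyName, param):
--     '''
--     Filtra un dicc mediante una keyword y un parametro dado.
--
--     Argumentos:
--         dicName: dicc a filtrar.
--         keyName: keyword donde se filtra.
--         param: parametro utilizado para filtrar.
--     Salida:
--         filteredDic: dicc filtrado.
--     '''
--     # constant
--     filteredDic = {}
--     i = 0
--     # sets the keywords
--     for key in dicName:
--         filteredDic[key] = []
--     # fills the dicc with the filtered elements
--     for elem in dicName[keyName]: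
--         if elem == param:
--             for key in dicName:
--                 filteredDic[key].append(dicName[key][i])
--         i += 1
--     # outputs dicc
--     return filteredDic
-- ===== SOURCE B (Python) =====
-- def diccFilter(dicName, keyName, param):
--     idxs = [i for i, e in enumerate(dicName[keyName]) if e == param]
--     return {key: [col[i] for i in idxs] for key, col in dicName.items()}
-- ===== Notes on version B (the rewrite author's own statement) =====
-- stated objective: simpler
-- what changed: B first scans the filter column once to collect matching row indices, then projects each column through that index list (column-major two-phase), instead of A's row-major fold that appends to every column inside the scan of the filter column.
import Mathlib
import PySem

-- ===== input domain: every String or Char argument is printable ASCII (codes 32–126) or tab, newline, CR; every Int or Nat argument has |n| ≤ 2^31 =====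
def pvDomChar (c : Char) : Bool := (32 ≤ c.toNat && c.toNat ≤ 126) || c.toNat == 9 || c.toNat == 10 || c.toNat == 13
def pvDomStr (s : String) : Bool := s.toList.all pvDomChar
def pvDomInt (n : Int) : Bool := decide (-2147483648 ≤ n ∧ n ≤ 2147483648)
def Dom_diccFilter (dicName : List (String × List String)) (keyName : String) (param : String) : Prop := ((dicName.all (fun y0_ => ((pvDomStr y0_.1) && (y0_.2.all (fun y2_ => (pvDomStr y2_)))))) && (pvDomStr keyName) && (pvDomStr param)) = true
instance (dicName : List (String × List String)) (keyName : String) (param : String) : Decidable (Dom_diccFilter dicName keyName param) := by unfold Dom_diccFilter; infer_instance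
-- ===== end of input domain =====

-- B builds the matching index list once and projects every column through it (column-major),
-- instead of A's row-major fold appending to each column while scanning the filter column.

-- ===== PORT A =====
-- The Python dict is the assoc list (unique keys inside Pre_); 'filteredDic[key].append(…) for key in dicName'
-- becomes a map over the accumulator's entries (same keys, same order as dicName), and dicName[key] is the
-- dict lookup PySem.Dict.getD, exactly as A reads it.
def diccFilter (dicName : List (String × List String)) (keyName : String) (param : String) : List (String × List String) :=
  -- filteredDic = {}; for key in dicName: filteredDic[key] = []
  let filteredDic : List (String × List String) := dicName.map (fun kv => (kv.1, []))
  -- for elem in dicName[keyName]: … ; i += 1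
  let col := (PySem.Dict.mk dicName).getD keyName []
  (PySem.List.enumerate col).foldl
    (fun fd ie =>
      if ie.2 == param then
        -- for key in dicName: filteredDic[key].append(dicName[key][i])
        fd.map (fun p =>
          (p.1, p.2 ++ [((PySem.List.pyGet? ((PySem.Dict.mk dicName).getD p.1 []) ie.1).getD "")]))
      else fd)
    filteredDic

-- ===== PORT B =====
def diccFilter_alt (dicName : List (String × List String)) (keyName : String) (param : String) : List (String × List String) :=
  -- idxs = [i for i, e in enumerate(dicName[keyName]) if e == param]
  let idxs := ((PySem.List.enumerate ((PySem.Dict.mk dicName).getD keyName [])).filter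
                (fun p => p.2 == param)).map (·.1)
  -- {key: [col[i] for i in idxs] for key, col in dicName.items()}
  dicName.map (fun kv => (kv.1, idxs.map (fun i => (PySem.List.pyGet? kv.2 i).getD "")))

-- ===== PRECONDITION & SPEC =====
-- Pre_ excludes inputs where Python A raises: keyName absent (KeyError) and matching rows whose index is
-- out of range in some column (IndexError); it also excludes assoc lists with duplicate keys, which are
-- not representable as a Python dict.
def Pre_diccFilter (dicName : List (String × List String)) (keyName : String) (param : String) : Prop :=
  (dicName.map Prod.fst).Nodup ∧
  keyName ∈ dicName.map Prod.fst ∧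
  ∀ p ∈ PySem.List.enumerate ((PySem.Dict.mk dicName).getD keyName []),
    p.2 = param → ∀ kv ∈ dicName, p.1 < (kv.2.length : Int)
instance (dicName : List (String × List String)) (keyName : String) (param : String) : Decidable (Pre_diccFilter dicName keyName param) := by unfold Pre_diccFilter; infer_instance

def pvWitness_diccFilter : (List (String × List String)) × String × String :=
  ([("id", ["1", "2", "1"]), ("name", ["a", "b", "c"])], "id", "1")

def Spec_diccFilter (dicName : List (String × List String)) (keyName : String) (param : String) (out : List (String × List String)) : Prop := out = diccFilter_alt dicName keyName param
instance (dicName : List (String × List String)) (keyName : String) (param : String) (out : List (String × List String)) : Decidable (Spec_diccFilter dicName keyName param out) := by unfold Spec_diccFilter; infer_instance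

-- ===== CLAIM (what is proved, stated in full; the proofs are below) =====
def Claim_equal_diccFilter : Prop := ∀ (dicName : List (String × List String)) (keyName : String) (param : String), Dom_diccFilter dicName keyName param → Pre_diccFilter dicName keyName param → Spec_diccFilter dicName keyName param (diccFilter dicName keyName param)

-- ===== LEMMAS AND PROOFS =====

-- A's fold over the enumerated filter column equals: append, to each entry, the projection of that
-- entry's column through the list of matching indices.
theorem pv_foldl_char (param : String) (g : String → Int → String) :
    ∀ (l : List (Int × String)) (fd : List (String × List String)),
      l.foldl
        (fun fd ie =>
          if ie.2 == param then fd.map (fun p => (p.1, p.2 ++ [g p.1 ie.1])) else fd) fd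
      = fd.map (fun p =>
          (p.1, p.2 ++ ((l.filter (fun q => q.2 == param)).map (·.1)).map (g p.1))) := by
  intro l
  induction l with
  | nil => intro fd; simp
  | cons ie l ih =>
    intro fd
    by_cases h : ie.2 == param
    · simp only [List.foldl_cons, List.filter_cons, h, if_pos, ih, List.map_map]
      simp [Function.comp, List.append_assoc]
    · simp only [List.foldl_cons, List.filter_cons, h, ih]
      simp

theorem pv_getD_mk_of_mem {dicName : List (String × List String)} {kv : String × List String}
    (hmem : kv ∈ dicName) (hnd : (dicName.map Prod.fst).Nodup) :
    (PySem.Dict.mk dicName).getD kv.1 [] = kv.2 := by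
  exact PySem.Dict.getD_of_mem_items (d := PySem.Dict.mk dicName) (k := kv.1) (v := kv.2) hmem hnd []

-- ===== VERDICT (by name: the statement is the Claim_ definition above) =====
theorem diccFilter_spec : Claim_equal_diccFilter := by
  intro dicName keyName param _hdom hpre
  obtain ⟨hnd, -, -⟩ := hpre
  unfold Spec_diccFilter diccFilter diccFilter_alt
  rw [pv_foldl_char param
      (fun k i => ((PySem.List.pyGet? ((PySem.Dict.mk dicName).getD k []) i).getD ""))]
  rw [List.map_map]
  apply List.map_congr_left
  intro kv hmem
  simp [Function.comp, pv_getD_mk_of_mem hmem hnd]
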